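-- pv_equiv track=rewrite | github.com/ktawiah/CodePath-DSA | Unit-2/Session-2/Standard_V1/equivalent_species_pairs.py | num_equiv_species_pairs
-- ===== SOURCE A (Python) =====
-- def num_equiv_species_pairs(species_pairs):
--     """
--     P: Problem Definition
--       - For any species pair [a,b], [c,d] in species pairs, determine the number of equivalent species
--       - Meaning a==c and b==d, or a==d and b==c
--       - For both pairs to be unique, each element in first pair must be found in the other
--
--     I: Input/Output
--       - Input -> List[List[ints]] an Output -> int
--
--       Example: [[1, 2], [2, 1], [3, 4], [5, 6]] -> 1
--
--     C: Edge Cases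
--       - No pairs, Empty -> 0
--       - One pair -> 0
--
--     A: Approach/Algorithm
--       - Handle edge cases
--       - Create a counter to keep track of equivalent pairs
--       - Iterate through the species pairs
--       - Compare current pair to next pairs -> n -> n+1..len(s_p), set(first) == set(second)
--       - Updating a counter
--       - Return the counter
--
--     S: Solve/Implementation
--       - Done
--
--     S: Study/Analyse
--       - Time complexity -> O(n^2)
--       - Space complexity -> O(1)
--
--     O: Optimize
--       - Optimal since each element should be compared with all other elements to determine whether the pair is equivalent
--     """
--     if len(species_pairs) < 2:
--         return 0
--
--     # Create a counter to keep track of equivalent pairs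
--     count = 0
--
--     # Iterate through the species pairs
--     for index, f_pair in enumerate(species_pairs):  # O(n)
--         for s_pair in species_pairs[index + 1 :]:  # O(n-1)
--             # Compare current pair to next pairs -> n -> n+1..len(s_p), set(first) == set(second)
--             if set(f_pair) == set(s_pair):  # O(1)
--                 count += 1
--
--     return count
-- ===== SOURCE B (Python) =====
-- def num_equiv_species_pairs(species_pairs):
--     count = 0
--     seen = {}
--     for pair in species_pairs:
--         key = tuple(sorted(set(pair)))
--         c = seen.get(key, 0)
--         count += c
--         seen[key] = c + 1
--     return count
-- ===== Notes on version B (the rewrite author's own statement) =====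
-- stated objective: faster
-- what changed: Instead of comparing every pair with every later pair by set equality, B normalizes each pair once to a sorted deduplicated key and makes one pass with a dictionary, adding the number of earlier pairs with the same key.
import Mathlib
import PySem

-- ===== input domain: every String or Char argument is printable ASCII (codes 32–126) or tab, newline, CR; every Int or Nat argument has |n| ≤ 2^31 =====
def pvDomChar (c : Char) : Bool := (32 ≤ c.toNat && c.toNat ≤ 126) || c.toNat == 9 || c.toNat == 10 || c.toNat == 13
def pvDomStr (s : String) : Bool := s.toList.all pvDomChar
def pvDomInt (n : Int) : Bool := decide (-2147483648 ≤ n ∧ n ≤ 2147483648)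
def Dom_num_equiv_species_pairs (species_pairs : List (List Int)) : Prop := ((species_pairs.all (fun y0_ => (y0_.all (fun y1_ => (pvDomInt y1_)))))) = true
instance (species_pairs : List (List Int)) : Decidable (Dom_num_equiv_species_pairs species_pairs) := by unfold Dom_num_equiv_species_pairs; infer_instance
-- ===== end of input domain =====

-- B replaces A's O(n^2) all-pairs set comparison by a single pass that normalizes each
-- pair to a sorted deduplicated key and counts earlier occurrences in a dictionary (faster).


-- ===== PORT A =====
-- set(f_pair) == set(s_pair)
def pvSetEq (f_pair s_pair : List Int) : Bool :=
  PySem.Set.equal (PySem.Set.ofList f_pair) (PySem.Set.ofList s_pair)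

def num_equiv_species_pairs (species_pairs : List (List Int)) : Int :=
  if species_pairs.length < 2 then 0
  else
    (PySem.List.enumerate species_pairs).foldl
      (fun count p =>
        (PySem.List.slice species_pairs (some (p.1 + 1))).foldl
          (fun count s_pair => if pvSetEq p.2 s_pair then count + 1 else count) count)
      0

-- ===== PORT B =====
-- tuple(sorted(set(pair)))
def pvKey (pair : List Int) : List Int :=
  PySem.List.sorted (PySem.Set.ofList pair) (fun x => x) false

def num_equiv_species_pairs_alt (species_pairs : List (List Int)) : Int :=
  (species_pairs.foldl
    (fun (st : Int × PySem.Dict (List Int) Int) pair =>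
      let k := pvKey pair
      let c := st.2.getD k 0
      (st.1 + c, st.2.insert k (c + 1)))
    (0, PySem.Dict.empty)).1

-- ===== PRECONDITION & SPEC =====
def Spec_num_equiv_species_pairs (species_pairs : List (List Int)) (out : Int) : Prop := out = num_equiv_species_pairs_alt species_pairs
instance (species_pairs : List (List Int)) (out : Int) : Decidable (Spec_num_equiv_species_pairs species_pairs out) := by unfold Spec_num_equiv_species_pairs; infer_instance

-- ===== CLAIM =====
def Claim_equal_num_equiv_species_pairs : Prop := ∀ (species_pairs : List (List Int)), Dom_num_equiv_species_pairs species_pairs → Spec_num_equiv_species_pairs species_pairs (num_equiv_species_pairs species_pairs)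

-- ===== LEMMAS AND PROOFS =====

-- ===== LEMMAS AND PROOFS =====
-- reference count: for each element, how many LATER elements have the same key
def pvPairCount : List (List Int) → Int
  | [] => 0
  | x :: xs => ((xs.countP fun y => pvKey y == pvKey x) : Int) + pvPairCount xs

lemma pvSetEq_iff_key (f s : List Int) : pvSetEq f s = (pvKey f == pvKey s) := by
  have h : pvSetEq f s = true ↔ (pvKey f == pvKey s) = true := by
    simp only [pvSetEq, pvKey, PySem.Set.equal, Bool.and_eq_true, PySem.Set.issubset_iff,
      beq_iff_eq, PySem.List.sorted_id_eq_sorted_id_iff_perm,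
      List.perm_ext_iff_of_nodup (PySem.Set.nodup_ofList f) (PySem.Set.nodup_ofList s)]
    constructor
    · rintro ⟨h1, h2⟩ a; exact ⟨fun ha => h1 a ha, fun ha => h2 a ha⟩
    · intro h; exact ⟨fun a ha => (h a).1 ha, fun a ha => (h a).2 ha⟩
  cases hb : pvSetEq f s <;> cases hk : (pvKey f == pvKey s) <;> simp_all

lemma pvBeqComm (a b : List Int) : (a == b) = (b == a) := by
  by_cases h : a = b
  · subst h; rfl
  · rw [beq_eq_false_iff_ne.mpr h, beq_eq_false_iff_ne.mpr (fun e => h e.symm)]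

-- A-side: the enumerate/slice double loop computes pvPairCount
set_option maxRecDepth 8192 in
lemma pvA_fold (full : List (List Int)) :
    ∀ (xs : List (List Int)) (n : Nat) (c : Int), List.drop n full = xs →
    (PySem.List.enumerate xs (n : Int)).foldl
      (fun count p =>
        (PySem.List.slice full (some (p.1 + 1))).foldl
          (fun count s_pair => if pvSetEq p.2 s_pair then count + 1 else count) count)
      c = c + pvPairCount xs := by
  intro xs
  induction xs with
  | nil => intro n c h; simp [PySem.List.enumerate, pvPairCount]
  | cons x xs ih =>
    intro n c h
    have hd : List.drop (n+1) full = xs := by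
      have h1 := congrArg (List.drop 1) h
      rw [List.drop_drop] at h1
      simpa [Nat.add_comm] using h1
    have hs : PySem.List.slice full (some ((n : Int) + 1)) = xs := by
      have h0 : (0:Int) ≤ (n:Int) + 1 := by positivity
      rw [PySem.List.slice_from full h0]
      have : ((n:Int)+1).toNat = n + 1 := by omega
      rw [this, hd]
    simp only [PySem.List.enumerate, List.foldl_cons]
    rw [hs]
    have hinner : xs.foldl (fun count s_pair => if pvSetEq x s_pair then count + 1 else count) c
        = c + (xs.countP fun s_pair => pvSetEq x s_pair) := by
      simpa using PySem.List.foldl_if_add_one (fun s_pair => pvSetEq x s_pair) xs c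
    rw [hinner]
    have := ih (n+1) (c + (xs.countP fun s_pair => pvSetEq x s_pair)) hd
    push_cast at this ⊢
    rw [this]
    have hc : (xs.countP fun s_pair => pvSetEq x s_pair) = (xs.countP fun y => pvKey y == pvKey x) := by
      apply List.countP_congr
      intro y _
      rw [pvSetEq_iff_key, pvBeqComm]
    rw [hc]
    simp only [pvPairCount]
    ring

-- B-side step
def pvStep (st : Int × PySem.Dict (List Int) Int) (pair : List Int) : Int × PySem.Dict (List Int) Int :=
  let k := pvKey pair
  let c := st.2.getD k 0
  (st.1 + c, st.2.insert k (c + 1))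

set_option maxRecDepth 8192 in
lemma pvB_fold :
    ∀ (xs seen : List (List Int)) (c : Int) (d : PySem.Dict (List Int) Int),
    (∀ k, d.getD k 0 = ((seen.countP fun y => pvKey y == k) : Int)) →
    (xs.foldl pvStep (c, d)).1
      = c + ((xs.map (fun x => ((seen.countP fun y => pvKey y == pvKey x) : Int))).sum) + pvPairCount xs := by
  intro xs
  induction xs with
  | nil => intro seen c d h; simp [pvPairCount]
  | cons x xs ih =>
    intro seen c d h
    simp only [List.foldl_cons]
    have hstep : pvStep (c, d) x
        = (c + ((seen.countP fun y => pvKey y == pvKey x) : Int),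
           d.insert (pvKey x) (((seen.countP fun y => pvKey y == pvKey x) : Int) + 1)) := by
      simp [pvStep, h]
    rw [hstep]
    have h' : ∀ k, (d.insert (pvKey x) (((seen.countP fun y => pvKey y == pvKey x) : Int) + 1)).getD k 0
        = (((seen ++ [x]).countP fun y => pvKey y == k) : Int) := by
      intro k
      rw [PySem.Dict.getD_insert]
      by_cases hk : k = pvKey x
      · subst hk
        simp [List.countP_append]
      · rw [if_neg hk]
        have hne : (pvKey x == k) = false := beq_eq_false_iff_ne.mpr (fun hx => hk hx.symm)
        simp [List.countP_append, h k, hne]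
    rw [ih (seen ++ [x]) _ _ h']
    have hsum : ((xs.map (fun x' => (((seen ++ [x]).countP fun y => pvKey y == pvKey x') : Int))).sum)
        = ((xs.map (fun x' => ((seen.countP fun y => pvKey y == pvKey x') : Int))).sum)
          + ((xs.countP fun y => pvKey y == pvKey x) : Int) := by
      have hmap : (xs.map (fun x' => (((seen ++ [x]).countP fun y => pvKey y == pvKey x') : Int)))
          = (xs.map (fun x' => ((seen.countP fun y => pvKey y == pvKey x') : Int)
              + (if pvKey x == pvKey x' then (1:Int) else 0))) := by
        apply List.map_congr_left
        intro x' _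
        by_cases hx : pvKey x == pvKey x'
        · simp [List.countP_append, hx]
        · simp [List.countP_append, hx]
      rw [hmap]
      rw [PySem.List.sum_map_add_int]
      congr 1
      have : (xs.map (fun x' => (if pvKey x == pvKey x' then (1:Int) else 0)))
          = (xs.map (fun x' => (if (fun y => pvKey y == pvKey x) x' = true then (1:Int) else 0))) := by
        apply List.map_congr_left; intro x' _
        rw [pvBeqComm]
      rw [this, PySem.List.sum_map_ite_one_zero]
    rw [hsum]
    simp only [pvPairCount, List.map_cons, List.sum_cons]
    ring

-- ===== VERDICT =====
theorem num_equiv_species_pairs_spec : Claim_equal_num_equiv_species_pairs := by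
  unfold Claim_equal_num_equiv_species_pairs
  intro l _
  unfold Spec_num_equiv_species_pairs
  have hB : num_equiv_species_pairs_alt l = pvPairCount l := by
    unfold num_equiv_species_pairs_alt
    have h0 : ∀ k, (PySem.Dict.empty (κ := List Int) (ν := Int)).getD k 0
        = ((([] : List (List Int)).countP fun y => pvKey y == k) : Int) := by
      intro k; simp [PySem.Dict.empty, PySem.Dict.getD, PySem.Dict.get?]
    have := pvB_fold l [] 0 PySem.Dict.empty h0
    simpa [pvStep] using this
  have hA : num_equiv_species_pairs l = pvPairCount l := by
    unfold num_equiv_species_pairs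
    by_cases hl : l.length < 2
    · rw [if_pos hl]
      match l, hl with
      | [], _ => simp [pvPairCount]
      | [x], _ => simp [pvPairCount]
    · rw [if_neg hl]
      have := pvA_fold l l 0 0 (by simp)
      simpa using this
  rw [hA, hB]
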